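-- pv_equiv track=rewrite | github.com/nickchen111/Leetcode | Bit_Manipulation/3806. Maximum Bitwise AND After Increment Operations.py | maximumAND
-- ===== SOURCE A (Python) =====
-- from typing import List
--
-- def maximumAND(nums: List[int], k: int, m: int) -> int:
--     ans = 0
--     for i in range(30, -1, -1):
--         test_target = ans | (1 << i)
--
--         costs = []
--         for x in nums:
--             y = 0
--             possible_y = x | test_target
--             curr_y = 0
--             for bit in range(30, -1, -1):
--                 t_bit = (test_target >> bit) & 1
--                 x_bit = (x >> bit) & 1
--                 if t_bit:
--                     curr_y |= (1 << bit)
--                     if not x_bit: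
--                         for low_bit in range(bit - 1, -1, -1):
--                             if (test_target >> low_bit) & 1:
--                                 curr_y |= (1 << low_bit)
--                         possible_y = curr_y
--                         break
--                 else:
--                     if x_bit:
--                         curr_y |= (1 << bit)
--
--             costs.append(possible_y - x)
--
--         costs.sort()
--         if sum(costs[:m]) <= k:
--             ans = test_target
--
--     return ans
-- ===== SOURCE B (Python) =====
-- def _cost(x, t):
--     # smallest increment making x contain all bits of t, matching A's
--     # reconstruction which reads only bits 0..30 of x (hence the 31-bit mask)
--     diff = t & ~x
--     if diff == 0:
--         return 0
--     p = diff.bit_length() - 1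
--     y = ((x & 0x7FFFFFFF) >> (p + 1) << (p + 1)) | (1 << p) | (t & ((1 << p) - 1))
--     return y - x
--
-- def maximumAND(nums, k, m):
--     ans = 0
--     for i in range(30, -1, -1):
--         t = ans | (1 << i)
--         costs = sorted(_cost(x, t) for x in nums)
--         if sum(costs[:m]) <= k:
--             ans = t
--     return ans
-- ===== Notes on version B (the rewrite author's own statement) =====
-- stated objective: faster
-- what changed: The per-element inner reconstruction loop over bits 30..0 (with a nested low-bit fill loop) is replaced by a closed-form O(1) cost: locate the highest target bit missing from x via diff = t & ~x and bit_length, and build the resulting value with shift/mask arithmetic; the outer greedy loop and the sort of costs are kept.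
import Mathlib
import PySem

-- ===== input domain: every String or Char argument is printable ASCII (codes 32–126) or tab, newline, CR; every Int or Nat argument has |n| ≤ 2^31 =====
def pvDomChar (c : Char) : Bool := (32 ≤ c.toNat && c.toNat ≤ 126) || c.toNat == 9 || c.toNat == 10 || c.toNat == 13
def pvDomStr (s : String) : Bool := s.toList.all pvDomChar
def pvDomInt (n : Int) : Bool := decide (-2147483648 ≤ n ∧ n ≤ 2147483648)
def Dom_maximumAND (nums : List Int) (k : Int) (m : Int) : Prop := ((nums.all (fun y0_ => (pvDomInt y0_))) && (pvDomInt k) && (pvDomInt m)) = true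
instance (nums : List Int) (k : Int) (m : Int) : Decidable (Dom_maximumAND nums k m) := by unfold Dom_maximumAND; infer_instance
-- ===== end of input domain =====

-- B computes each element's increment cost in closed form (highest missing target bit via
-- bit_length + shift/mask arithmetic) instead of A's per-bit reconstruction loop; the outer
-- greedy loop and the sort are unchanged. Objective: faster (constant-factor, measured).

-- ===== PORT A =====
-- helper: the inner low-bit fill loop of A ('for low_bit in range(bit-1,-1,-1): ...')
def pvFillLow (tt : Int) (bit : Int) (cy : Int) : Int :=
  (PySem.List.pyRange (bit - 1) (-1) (-1)).foldl
    (fun c lb =>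
      let lbn : Nat := lb.toNat
      if PySem.Int.band (tt >>> lbn) 1 ≠ 0 then PySem.Int.bor c ((1:Int) <<< lbn) else c) cy

-- helper: A's per-element bit loop ('for bit in range(30,-1,-1): ...'), state (possible_y, curr_y);
-- the 'break' returns possible_y (= curr_y after the fill) immediately.
-- '.toNat' on the loop indices is exact: every index produced by these ranges is ≥ 0.
def pvBitLoop (tt x : Int) : List Int → Int × Int → Int
  | [], st => st.1
  | b :: bs, st =>
    let bn : Nat := b.toNat
    let t_bit := PySem.Int.band (tt >>> bn) 1
    let x_bit := PySem.Int.band (x >>> bn) 1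
    if t_bit ≠ 0 then
      let cy := PySem.Int.bor st.2 ((1:Int) <<< bn)
      if x_bit = 0 then pvFillLow tt b cy
      else pvBitLoop tt x bs (st.1, cy)
    else
      if x_bit ≠ 0 then pvBitLoop tt x bs (st.1, PySem.Int.bor st.2 ((1:Int) <<< bn))
      else pvBitLoop tt x bs st

-- helper: the body computing one element of 'costs' (possible_y - x)
def pvCostA (tt x : Int) : Int :=
  pvBitLoop tt x (PySem.List.pyRange 30 (-1) (-1)) (PySem.Int.bor x tt, 0) - x

def maximumAND (nums : List Int) (k : Int) (m : Int) : Int :=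
  (PySem.List.pyRange 30 (-1) (-1)).foldl
    (fun ans i =>
      let tt := PySem.Int.bor ans (1 <<< i.toNat)
      let costs := nums.foldl (fun cs x => cs ++ [pvCostA tt x]) []
      let costs := PySem.List.sorted costs (fun c => c) false
      if (PySem.List.slice costs none (some m)).sum <= k then tt else ans) 0

-- ===== PORT B =====
-- helper: closed-form cost for one element (Source B's _cost)
def pvCostB (x t : Int) : Int :=
  let diff := PySem.Int.band t (Int.not x)
  if diff = 0 then 0
  else
    let p := PySem.Int.bitLength diff - 1
    let y := PySem.Int.bor
      (PySem.Int.bor (((PySem.Int.band x 2147483647) >>> (p + 1)) <<< (p + 1)) (1 <<< p))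
      (PySem.Int.band t ((1 <<< p) - 1))
    y - x

def maximumAND_alt (nums : List Int) (k : Int) (m : Int) : Int :=
  (PySem.List.pyRange 30 (-1) (-1)).foldl
    (fun ans i =>
      let t := PySem.Int.bor ans (1 <<< i.toNat)
      let costs := PySem.List.sorted (nums.map (fun x => pvCostB x t)) (fun c => c) false
      if (PySem.List.slice costs none (some m)).sum <= k then t else ans) 0

-- ===== PRECONDITION & SPEC =====
def Spec_maximumAND (nums : List Int) (k : Int) (m : Int) (out : Int) : Prop := out = maximumAND_alt nums k m
instance (nums : List Int) (k : Int) (m : Int) (out : Int) : Decidable (Spec_maximumAND nums k m out) := by unfold Spec_maximumAND; infer_instance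

-- ===== CLAIM (what is proved, stated in full; the proofs are below) =====
def Claim_equal_maximumAND : Prop := ∀ (nums : List Int) (k : Int) (m : Int), Dom_maximumAND nums k m → Spec_maximumAND nums k m (maximumAND nums k m)


-- ===== LEMMAS AND PROOFS =====

-- proof-side helpers: the descending index list, and the Nat-level views of tt and x
def pvDesc (n : Nat) : List Int := ((List.range n).reverse).map (fun j => (j : Int))

def pvT (tt : Int) : Nat := tt.toNat
def pvX (x : Int) : Nat := (x % 2147483648).toNat
def pvD (tt x : Int) : Nat := (pvT tt).ldiff (pvX x)

lemma pvDesc_succ (n : Nat) : pvDesc (n+1) = ((n : Nat) : Int) :: pvDesc n := by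
  simp [pvDesc, List.range_succ]

lemma pvRange31 : PySem.List.pyRange 30 (-1) (-1) = pvDesc 31 := by decide

lemma pvRangeFill : ∀ b : Nat, b < 31 → PySem.List.pyRange ((b:Int) - 1) (-1) (-1) = pvDesc b := by decide

-- a - (a &&& b) is the bitwise difference
lemma pvSubAnd (a : Nat) : ∀ b, a - (a &&& b) = a.ldiff b := by
  induction a using Nat.binaryRec with
  | zero =>
    intro b
    have : (0:Nat).ldiff b = 0 := by
      apply Nat.eq_of_testBit_eq; intro i; simp [Nat.testBit_ldiff]
    omega
  | bit bit n ih =>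
    intro b
    induction b using Nat.bitCasesOn with
    | bit c m =>
      rw [Nat.land_bit, Nat.ldiff_bit]
      have h1 : n &&& m ≤ n := Nat.and_le_left
      have := ih m
      cases bit <;> cases c <;> simp [Nat.bit] <;> omega

lemma pvLog2_unique (a w : Nat) (h1 : 2^w ≤ a) (h2 : a < 2^(w+1)) : Nat.log2 a = w := by
  have hpw : 0 < 2^w := Nat.two_pow_pos w
  have ha : a ≠ 0 := by omega
  have h3 : 2 ^ Nat.log2 a ≤ a := Nat.log2_self_le ha
  have h4 : a < 2 ^ (Nat.log2 a + 1) := Nat.lt_log2_self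
  rcases Nat.lt_trichotomy (Nat.log2 a) w with h|h|h
  · have : 2 ^ (Nat.log2 a + 1) ≤ 2 ^ w := Nat.pow_le_pow_right (by norm_num) (by omega)
    omega
  · exact h
  · have : 2 ^ (w + 1) ≤ 2 ^ (Nat.log2 a) := Nat.pow_le_pow_right (by norm_num) (by omega)
    omega

lemma pvBitLength_log2 (D : Nat) (h : D ≠ 0) :
    PySem.Int.bitLength (D : Int) - 1 = Nat.log2 D := by
  have h1 : D < 2 ^ PySem.Int.bitLength (D:Int) := by
    simpa using PySem.Int.lt_two_pow_bitLength (D:Int)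
  have h2 : 2 ^ (PySem.Int.bitLength (D:Int) - 1) ≤ D := by
    simpa using PySem.Int.two_pow_bitLength_le (D:Int) (by exact_mod_cast h)
  have hbl : PySem.Int.bitLength (D:Int) ≠ 0 := by
    intro h0; rw [h0] at h1; simp at h1; omega
  have := pvLog2_unique D (PySem.Int.bitLength (D:Int) - 1) h2 (by
    have : PySem.Int.bitLength (D:Int) - 1 + 1 = PySem.Int.bitLength (D:Int) := by omega
    rw [this]; exact h1)
  omega

lemma pvT_lt (tt : Int) (hlt : tt < 2147483648) : pvT tt < 2^31 := by
  unfold pvT; omega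

lemma pvX_lt (x : Int) : pvX x < 2^31 := by unfold pvX; omega

lemma pvD_testBit (tt x : Int) (i : Nat) :
    (pvD tt x).testBit i = ((pvT tt).testBit i && !(pvX x).testBit i) := by
  unfold pvD; rw [Nat.testBit_ldiff]

lemma pvD_lt (tt x : Int) (hlt : tt < 2147483648) : pvD tt x < 2^31 := by
  have hT := pvT_lt tt hlt
  have : pvD tt x ≤ pvT tt := by
    have : pvD tt x &&& pvT tt = pvD tt x := by
      apply Nat.eq_of_testBit_eq; intro i
      rw [Nat.testBit_land, pvD_testBit]
      cases h : (pvT tt).testBit i <;> simp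
    calc pvD tt x = pvD tt x &&& pvT tt := this.symm
      _ ≤ pvT tt := Nat.and_le_right
  omega

lemma pvX_ofNat (n : Nat) : pvX (Int.ofNat n) = n % 2^31 := by
  unfold pvX
  have : ((Int.ofNat n) % 2147483648) = ((n % 2^31 : Nat) : Int) := by
    rw [Int.ofNat_eq_natCast]; push_cast; omega
  rw [this]; omega

lemma pvX_negSucc (n : Nat) : pvX (Int.negSucc n) = 2^31 - (n % 2^31 + 1) := by
  unfold pvX
  rw [Int.negSucc_eq]
  have h1 : ((n % 2^31 : Nat) : Int) = (n : Int) % 2147483648 := by push_cast; omega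
  omega

lemma pvX_testBit_negSucc (n i : Nat) (hi : i < 31) :
    (pvX (Int.negSucc n)).testBit i = !n.testBit i := by
  rw [pvX_negSucc, Nat.testBit_two_pow_sub_succ (Nat.mod_lt n (by norm_num)),
    Nat.testBit_mod_two_pow]
  simp [hi]

lemma pvX_testBit_ofNat (n i : Nat) (hi : i < 31) :
    (pvX (Int.ofNat n)).testBit i = n.testBit i := by
  rw [pvX_ofNat, Nat.testBit_mod_two_pow]; simp [hi]

lemma pvT_testBit_hi (tt : Int) (hlt : tt < 2147483648) (i : Nat) (hi : 31 ≤ i) :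
    (pvT tt).testBit i = false := by
  apply Nat.testBit_lt_two_pow
  calc pvT tt < 2^31 := pvT_lt tt hlt
    _ ≤ 2^i := Nat.pow_le_pow_right (by norm_num) hi

-- the t-bit read of the loops
lemma pvRead_t (tt : Int) (htt : 0 ≤ tt) (b : Nat) :
    PySem.Int.band (tt >>> b) 1 = (((pvT tt).testBit b).toNat : Int) := by
  have h1 : tt = ((pvT tt : Nat) : Int) := by unfold pvT; omega
  conv_lhs => rw [h1]
  have h2 : (((pvT tt : Nat) : Int) >>> b) = ((pvT tt >>> b : Nat) : Int) := rfl
  rw [h2]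
  have h3 : PySem.Int.band ((pvT tt >>> b : Nat) : Int) 1 = (((pvT tt >>> b) &&& 1 : Nat) : Int) := by
    exact_mod_cast PySem.Int.band_natCast (pvT tt >>> b) 1
  rw [h3]
  congr 1
  rw [Nat.shiftRight_eq_div_pow, Nat.and_one_is_mod, Nat.testBit_eq_decide_div_mod_eq]
  rcases Nat.mod_two_eq_zero_or_one (pvT tt / 2 ^ b) with h | h <;> simp [h]

-- the x-bit read of the loops only sees bits 0..30, i.e. x mod 2^31
lemma pvRead_x (x : Int) (b : Nat) (hb : b ≤ 30) :
    PySem.Int.band (x >>> b) 1 = (((pvX x).testBit b).toNat : Int) := by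
  rw [PySem.Int.band_one, PySem.Int.mod_eq_emod_of_pos (by norm_num : (0:Int) < 2)]
  rw [Int.shiftRight_eq_div_pow]
  have hpowN : 2^b * (2 * 2^(30 - b)) = 2147483648 := by
    rw [← pow_succ' 2 (30 - b), ← pow_add]
    have h31 : b + (30 - b + 1) = 31 := by omega
    rw [h31]
    norm_num
  have hsplit : (x / ((2^b : Nat) : Int)) % 2 = (((pvX x : Nat) : Int) / ((2^b : Nat) : Int)) % 2 := by
    set X : Nat := pvX x with hX
    set q : Int := x / 2147483648 with hq
    have hx2 : x = ((X : Nat) : Int) + (((2^(30-b) : Nat) : Int) * q) * 2 * ((2^b : Nat) : Int) := by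
      have hx : x = 2147483648 * q + ((X : Nat) : Int) := by rw [hX]; unfold pvX; omega
      have hpow : (2147483648 : Int) = ((2^b : Nat) : Int) * (2 * ((2^(30-b) : Nat) : Int)) := by
        exact_mod_cast hpowN.symm
      rw [hx, hpow]; ring
    calc x / ((2^b : Nat) : Int) % 2
        = (((X : Nat) : Int) + (((2^(30-b) : Nat) : Int) * q * 2) * ((2^b : Nat) : Int)) / ((2^b : Nat) : Int) % 2 := by
          conv_lhs => rw [hx2]
      _ = (((X : Nat) : Int) / ((2^b : Nat) : Int) + ((2^(30-b) : Nat) : Int) * q * 2) % 2 := by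
          rw [Int.add_mul_ediv_right _ _ (by positivity)]
      _ = ((X : Nat) : Int) / ((2^b : Nat) : Int) % 2 := by
          omega
  rw [hsplit]
  have hcast : (((pvX x : Nat) : Int) / ((2^b : Nat) : Int)) % 2 = (((pvX x / 2^b) % 2 : Nat) : Int) := by
    rfl
  rw [hcast]
  congr 1
  rw [Nat.testBit_eq_decide_div_mod_eq]
  rcases Nat.mod_two_eq_zero_or_one (pvX x / 2 ^ b) with h | h <;> simp [h]

-- diff = t & ~x as a Nat
lemma pvDiff_eq (tt x : Int) (htt : 0 ≤ tt) (hlt : tt < 2147483648) :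
    PySem.Int.band tt (Int.not x) = ((pvD tt x : Nat) : Int) := by
  cases x with
  | ofNat n =>
    have h1 : Int.not (Int.ofNat n) = Int.negSucc n := rfl
    rw [h1]
    have h2 : PySem.Int.band tt (Int.negSucc n)
        = ((pvT tt - (pvT tt &&& n) : Nat) : Int) := by
      unfold PySem.Int.band
      rw [if_pos htt, if_neg (by rw [Int.negSucc_eq]; omega)]
      have e2 : (-Int.negSucc n - 1).toNat = n := by rw [Int.negSucc_eq]; omega
      rw [e2]; rfl
    rw [h2, pvSubAnd]
    congr 1
    apply Nat.eq_of_testBit_eq; intro i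
    rw [Nat.testBit_ldiff, pvD_testBit]
    by_cases hi : i < 31
    · rw [pvX_testBit_ofNat n i hi]
    · rw [pvT_testBit_hi tt hlt i (by omega)]; simp
  | negSucc n =>
    have h1 : Int.not (Int.negSucc n) = Int.ofNat n := rfl
    rw [h1]
    have h2 : PySem.Int.band tt (Int.ofNat n) = ((pvT tt &&& n : Nat) : Int) := by
      unfold PySem.Int.band
      rw [if_pos htt, if_pos (by rw [Int.ofNat_eq_natCast]; positivity)]
      rfl
    rw [h2]
    congr 1
    apply Nat.eq_of_testBit_eq; intro i
    rw [Nat.testBit_land, pvD_testBit]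
    by_cases hi : i < 31
    · rw [pvX_testBit_negSucc n i hi, Bool.not_not]
    · rw [pvT_testBit_hi tt hlt i (by omega)]; simp

-- x | tt = x when every bit of tt is a bit of x (diff = 0)
lemma pvBorSelf (tt x : Int) (htt : 0 ≤ tt) (hlt : tt < 2147483648)
    (h0 : pvD tt x = 0) : PySem.Int.bor x tt = x := by
  have hsub : ∀ i, (pvT tt).testBit i = true → (pvX x).testBit i = true := by
    intro i hTi
    have h := congrArg (fun v => v.testBit i) h0
    simp only [Nat.zero_testBit] at h
    rw [pvD_testBit, hTi] at h
    simpa using h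
  cases x with
  | ofNat n =>
    have h2 : PySem.Int.bor (Int.ofNat n) tt = ((n ||| pvT tt : Nat) : Int) := by
      unfold PySem.Int.bor
      rw [if_pos (by rw [Int.ofNat_eq_natCast]; positivity), if_pos htt]
      rfl
    rw [h2]
    have h3 : n ||| pvT tt = n := by
      apply Nat.eq_of_testBit_eq; intro i
      rw [Nat.testBit_lor]
      by_cases hTi : (pvT tt).testBit i = true
      · have hx := hsub i hTi
        by_cases hi : i < 31
        · rw [pvX_testBit_ofNat n i hi] at hx
          simp [hx]
        · rw [pvT_testBit_hi tt hlt i (by omega)] at hTi; simp at hTi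
      · simp only [Bool.not_eq_true] at hTi
        simp [hTi]
    rw [h3]; rfl
  | negSucc n =>
    have h2 : PySem.Int.bor (Int.negSucc n) tt
        = -((n - (n &&& pvT tt) : Nat) : Int) - 1 := by
      unfold PySem.Int.bor
      rw [if_neg (by rw [Int.negSucc_eq]; omega), if_pos htt]
      have e2 : (-Int.negSucc n - 1).toNat = n := by rw [Int.negSucc_eq]; omega
      rw [e2]; rfl
    rw [h2, pvSubAnd]
    have h3 : n.ldiff (pvT tt) = n := by
      apply Nat.eq_of_testBit_eq; intro i
      rw [Nat.testBit_ldiff]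
      by_cases hTi : (pvT tt).testBit i = true
      · have hx := hsub i hTi
        by_cases hi : i < 31
        · rw [pvX_testBit_negSucc n i hi] at hx
          simp at hx
          simp [hx]
        · rw [pvT_testBit_hi tt hlt i (by omega)] at hTi; simp at hTi
      · simp only [Bool.not_eq_true] at hTi
        simp [hTi]
    rw [h3, Int.negSucc_eq]; ring

-- x & 0x7FFFFFFF as a Nat
lemma pvMask_eq (x : Int) : PySem.Int.band x 2147483647 = ((pvX x : Nat) : Int) := by
  cases x with
  | ofNat n =>
    have h2 : PySem.Int.band (Int.ofNat n) 2147483647 = ((n &&& 2147483647 : Nat) : Int) := by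
      unfold PySem.Int.band
      rw [if_pos (by rw [Int.ofNat_eq_natCast]; positivity), if_pos (by norm_num)]
      rfl
    rw [h2]
    have hm : (2147483647 : Nat) = 2^31 - 1 := by norm_num
    rw [hm, Nat.and_two_pow_sub_one_eq_mod, pvX_ofNat]
  | negSucc n =>
    have h2 : PySem.Int.band (Int.negSucc n) 2147483647
        = ((2147483647 - (2147483647 &&& n) : Nat) : Int) := by
      unfold PySem.Int.band
      rw [if_neg (by rw [Int.negSucc_eq]; omega), if_pos (by norm_num)]
      have e2 : (-Int.negSucc n - 1).toNat = n := by rw [Int.negSucc_eq]; omega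
      rw [e2]
      rfl
    rw [h2]
    have hm : (2147483647 : Nat) = 2^31 - 1 := by norm_num
    have hand : (2147483647 : Nat) &&& n = n % 2^31 := by
      rw [hm, Nat.land_comm, Nat.and_two_pow_sub_one_eq_mod]
    rw [hand, hm, pvX_negSucc]
    congr 1
    have : n % 2^31 < 2^31 := Nat.mod_lt n (by norm_num)
    omega

-- the fill loop sets every bit of tt below b
lemma pvFill_eq (tt : Int) (htt : 0 ≤ tt) (b : Nat) (hb : b < 31) (cy : Nat) :
    pvFillLow tt (b : Int) ((cy : Nat) : Int) = ((cy ||| pvT tt % 2^b : Nat) : Int) := by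
  unfold pvFillLow
  rw [pvRangeFill b hb]
  clear hb
  induction b generalizing cy with
  | zero => simp [pvDesc, Nat.mod_one]
  | succ n ih =>
    rw [pvDesc_succ, List.foldl_cons]
    simp only [Int.toNat_natCast]
    rw [pvRead_t tt htt n]
    by_cases hbit : (pvT tt).testBit n = true
    · rw [hbit]
      simp only [Bool.toNat_true, Nat.cast_one, ne_eq, one_ne_zero, not_false_eq_true, if_true]
      have hor : PySem.Int.bor ((cy : Nat) : Int) ((1:Int) <<< n) = ((cy ||| 2^n : Nat) : Int) := by
        have h1 : ((1:Int) <<< n) = ((2^n : Nat) : Int) := by simp [Int.shiftLeft_eq]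
        rw [h1]
        exact_mod_cast PySem.Int.bor_natCast cy (2^n)
      rw [hor, ih]
      congr 1
      apply Nat.eq_of_testBit_eq; intro i
      simp only [Nat.testBit_lor, Nat.testBit_mod_two_pow, Nat.testBit_two_pow]
      by_cases hin : i = n
      · subst hin
        simp [hbit]
      · by_cases hlt2 : i < n <;> by_cases hlt3 : i < n + 1 <;> simp [Ne.symm hin, hlt2, hlt3] <;> omega
    · simp only [Bool.not_eq_true] at hbit
      rw [hbit]
      simp only [Bool.toNat_false, Nat.cast_zero, ne_eq, not_true_eq_false, if_false]
      rw [ih]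
      congr 1
      apply Nat.eq_of_testBit_eq; intro i
      simp only [Nat.testBit_lor, Nat.testBit_mod_two_pow]
      by_cases hin : i = n
      · subst hin; simp [hbit]
      · by_cases hlt2 : i < n <;> by_cases hlt3 : i < n + 1 <;> simp [hlt2, hlt3] <;> omega

-- the main per-bit loop of A, characterised
lemma pvBorPow (cy n : Nat) :
    PySem.Int.bor ((cy : Nat) : Int) ((1:Int) <<< n) = ((cy ||| 2^n : Nat) : Int) := by
  have h1 : ((1:Int) <<< n) = ((2^n : Nat) : Int) := by simp [Int.shiftLeft_eq]
  rw [h1]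
  exact_mod_cast PySem.Int.bor_natCast cy (2^n)

lemma pvHi_testBit (a k i : Nat) : ((a >>> k) <<< k).testBit i = (decide (k ≤ i) && a.testBit i) := by
  rw [Nat.testBit_shiftLeft]
  by_cases h : k ≤ i
  · have h2 : k + (i - k) = i := by omega
    rw [Nat.testBit_shiftRight, h2]
  · simp [h, ge_iff_le]

lemma pvModBitFalse (a n : Nat) (h : a.testBit n = false) : a % 2^(n+1) = a % 2^n := by
  apply Nat.eq_of_testBit_eq; intro i
  simp only [Nat.testBit_mod_two_pow]
  by_cases h2 : i = n
  · rw [h2]; simp [h]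
  · by_cases h1 : i < n
    · simp [h1, (by omega : i < n + 1)]
    · have h3 : ¬ i ≤ n := by omega
      simp [h1, h3]

lemma pvLoop_spec (tt x : Int) (htt : 0 ≤ tt) :
    ∀ n, n ≤ 31 → ∀ (cy : Nat) (py : Int),
    pvBitLoop tt x (pvDesc n) (py, ((cy : Nat) : Int)) =
      if pvD tt x % 2^n = 0 then py
      else ((cy ||| ((pvX x % 2^n) >>> (Nat.log2 (pvD tt x % 2^n) + 1)) <<< (Nat.log2 (pvD tt x % 2^n) + 1)
              ||| 2^(Nat.log2 (pvD tt x % 2^n)) ||| pvT tt % 2^(Nat.log2 (pvD tt x % 2^n)) : Nat) : Int) := by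
  intro n
  induction n with
  | zero =>
    intro _ cy py
    simp [pvDesc, pvBitLoop, Nat.mod_one]
  | succ n ih =>
    intro hn cy py
    rw [pvDesc_succ]
    simp only [pvBitLoop, Int.toNat_natCast]
    rw [pvRead_t tt htt n, pvRead_x x n (by omega)]
    by_cases hTb : (pvT tt).testBit n = true
    · rw [hTb]
      by_cases hXb : (pvX x).testBit n = true
      · -- t bit set, x bit set: no break, recurse with curr_y | 2^n
        rw [hXb]
        norm_num
        rw [pvBorPow cy n, ih (by omega) (cy ||| 2^n) py]
        have hDbit : (pvD tt x).testBit n = false := by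
          rw [pvD_testBit, hXb]
          simp
        rw [pvModBitFalse _ _ hDbit]
        by_cases hD0 : pvD tt x % 2^n = 0
        · rw [if_pos hD0, if_pos hD0]
        · rw [if_neg hD0, if_neg hD0]
          congr 1
          have hplt : Nat.log2 (pvD tt x % 2^n) < n := by
            rw [Nat.log2_lt hD0]
            exact Nat.mod_lt _ (Nat.two_pow_pos n)
          set p := Nat.log2 (pvD tt x % 2^n) with hp
          apply Nat.eq_of_testBit_eq; intro i
          simp only [Nat.testBit_lor, pvHi_testBit, Nat.testBit_mod_two_pow, Nat.testBit_two_pow]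
          by_cases hin : i = n
          · rw [hin]
            simp [hXb, (by omega : p + 1 ≤ n), (by omega : n < n + 1)]
          · by_cases h1 : i < n <;> by_cases h2 : i < n + 1 <;>
              simp [Ne.symm hin, h1, h2] <;> omega
      · -- t bit set, x bit clear: break and fill the low bits of t
        simp only [Bool.not_eq_true] at hXb
        rw [hXb]
        norm_num
        rw [pvBorPow cy n]
        have hfill := pvFill_eq tt htt n (by omega) (cy ||| 2^n)
        rw [hfill]
        have hDbit : (pvD tt x % 2^(n+1)).testBit n = true := by
          rw [Nat.testBit_mod_two_pow]
          simp only [pvD_testBit, hTb, hXb]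
          simp
        have hD0 : pvD tt x % 2^(n+1) ≠ 0 := by
          intro h0; rw [h0] at hDbit; simp at hDbit
        rw [if_neg hD0]
        have hlog : Nat.log2 (pvD tt x % 2^(n+1)) = n :=
          pvLog2_unique _ n (Nat.ge_two_pow_of_testBit hDbit) (Nat.mod_lt _ (Nat.two_pow_pos (n+1)))
        rw [hlog]
        congr 1
        have hshift : (pvX x % 2^(n+1)) >>> (n+1) = 0 := by
          rw [Nat.shiftRight_eq_div_pow]
          exact Nat.div_eq_of_lt (Nat.mod_lt _ (Nat.two_pow_pos (n+1)))
        rw [hshift]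
        apply Nat.eq_of_testBit_eq; intro i
        simp only [Nat.testBit_lor, Nat.testBit_mod_two_pow, Nat.testBit_two_pow, Nat.zero_shiftLeft,
          Nat.zero_testBit]
        by_cases hin : i = n
        · subst hin; simp
        · simp [Ne.symm hin]
    · -- t bit clear: copy x's bit into curr_y
      simp only [Bool.not_eq_true] at hTb
      rw [hTb]
      norm_num
      have hDbit : (pvD tt x).testBit n = false := by
        rw [pvD_testBit, hTb]
        simp
      have hmod := pvModBitFalse _ _ hDbit
      by_cases hXb : (pvX x).testBit n = true
      · rw [hXb]
        norm_num
        rw [pvBorPow cy n, ih (by omega) (cy ||| 2^n) py, hmod]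
        by_cases hD0 : pvD tt x % 2^n = 0
        · rw [if_pos hD0, if_pos hD0]
        · rw [if_neg hD0, if_neg hD0]
          congr 1
          have hplt : Nat.log2 (pvD tt x % 2^n) < n := by
            rw [Nat.log2_lt hD0]
            exact Nat.mod_lt _ (Nat.two_pow_pos n)
          set p := Nat.log2 (pvD tt x % 2^n) with hp
          apply Nat.eq_of_testBit_eq; intro i
          simp only [Nat.testBit_lor, pvHi_testBit, Nat.testBit_mod_two_pow, Nat.testBit_two_pow]
          by_cases hin : i = n
          · rw [hin]
            simp [hXb, (by omega : p + 1 ≤ n), (by omega : n < n + 1)]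
          · by_cases h1 : i < n <;> by_cases h2 : i < n + 1 <;>
              simp [Ne.symm hin, h1, h2] <;> omega
      · simp only [Bool.not_eq_true] at hXb
        rw [hXb]
        norm_num
        rw [ih (by omega) cy py, hmod]
        by_cases hD0 : pvD tt x % 2^n = 0
        · rw [if_pos hD0, if_pos hD0]
        · rw [if_neg hD0, if_neg hD0]
          congr 1
          have hplt : Nat.log2 (pvD tt x % 2^n) < n := by
            rw [Nat.log2_lt hD0]
            exact Nat.mod_lt _ (Nat.two_pow_pos n)
          set p := Nat.log2 (pvD tt x % 2^n) with hp
          apply Nat.eq_of_testBit_eq; intro i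
          simp only [Nat.testBit_lor, pvHi_testBit, Nat.testBit_mod_two_pow, Nat.testBit_two_pow]
          by_cases hin : i = n
          · rw [hin]
            simp [hXb, (by omega : p + 1 ≤ n), (by omega : n < n + 1)]
          · by_cases h1 : i < n <;> by_cases h2 : i < n + 1 <;>
              simp [h1, h2] <;> omega

-- per-element equality: A's reconstruction loop = B's closed form
lemma pvCost_eq (tt x : Int) (htt : 0 ≤ tt) (hlt : tt < 2147483648) :
    pvCostA tt x = pvCostB x tt := by
  unfold pvCostA pvCostB
  rw [pvRange31]
  have h0 : (0:Int) = ((0:Nat) : Int) := rfl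
  rw [h0, pvLoop_spec tt x htt 31 (le_refl 31) 0 (PySem.Int.bor x tt)]
  rw [pvDiff_eq tt x htt hlt]
  have hDlt : pvD tt x < 2^31 := pvD_lt tt x hlt
  have hmod : pvD tt x % 2^31 = pvD tt x := Nat.mod_eq_of_lt hDlt
  rw [hmod]
  by_cases hD0 : pvD tt x = 0
  · rw [if_pos hD0, if_pos (by exact_mod_cast congrArg (fun (v:Nat) => (v:Int)) hD0)]
    rw [pvBorSelf tt x htt hlt hD0]
    ring
  · rw [if_neg hD0, if_neg (by exact_mod_cast hD0)]
    have hp : PySem.Int.bitLength ((pvD tt x : Nat) : Int) - 1 = Nat.log2 (pvD tt x) :=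
      pvBitLength_log2 _ hD0
    rw [hp]
    set p := Nat.log2 (pvD tt x) with hpdef
    congr 1
    rw [pvMask_eq x]
    have hXmod : pvX x % 2^31 = pvX x := Nat.mod_eq_of_lt (pvX_lt x)
    rw [hXmod]
    have hsh1 : (((pvX x : Nat) : Int) >>> (p+1)) = ((pvX x >>> (p+1) : Nat) : Int) := rfl
    rw [hsh1]
    have hsh2 : (((pvX x >>> (p+1) : Nat) : Int) <<< (p+1)) = ((((pvX x >>> (p+1)) <<< (p+1)) : Nat) : Int) := rfl
    rw [hsh2]
    have hone : ((1 <<< p : Nat) : Int) = ((2^p : Nat) : Int) := by rw [Nat.one_shiftLeft]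
    rw [hone]
    have hband : PySem.Int.band tt (((2^p : Nat) : Int) - 1) = ((pvT tt % 2^p : Nat) : Int) := by
      have h1 : (((2^p : Nat) : Int) - 1) = ((2^p - 1 : Nat) : Int) := by
        have : (1:Nat) ≤ 2^p := Nat.one_le_two_pow
        push_cast [this]
        ring
      rw [h1]
      have h2 : tt = ((pvT tt : Nat) : Int) := by unfold pvT; omega
      conv_lhs => rw [h2]
      rw [PySem.Int.band_natCast]
      rw [Nat.and_two_pow_sub_one_eq_mod]
    rw [hband]
    have hbor1 : PySem.Int.bor ((((pvX x >>> (p+1)) <<< (p+1)) : Nat) : Int) ((2^p : Nat) : Int)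
        = ((((pvX x >>> (p+1)) <<< (p+1)) ||| 2^p : Nat) : Int) := PySem.Int.bor_natCast _ _
    rw [hbor1]
    have hbor2 : PySem.Int.bor ((((pvX x >>> (p+1)) <<< (p+1)) ||| 2^p : Nat) : Int) ((pvT tt % 2^p : Nat) : Int)
        = (((((pvX x >>> (p+1)) <<< (p+1)) ||| 2^p) ||| (pvT tt % 2^p) : Nat) : Int) := PySem.Int.bor_natCast _ _
    rw [hbor2]
    congr 1
    simp [Nat.zero_or]

-- outer greedy loop: the fold bodies agree whenever 0 ≤ ans < 2^31, which is invariant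
lemma pvOuterAux (nums : List Int) (k m : Int) :
    ∀ (l : List Int), (∀ i ∈ l, 0 ≤ i ∧ i ≤ (30:Int)) → ∀ ans : Int, 0 ≤ ans → ans < 2147483648 →
    l.foldl (fun ans i =>
      let tt := PySem.Int.bor ans ((1 <<< i.toNat : Nat) : Int)
      let costs := nums.foldl (fun cs x => cs ++ [pvCostA tt x]) []
      let costs := PySem.List.sorted costs (fun c => c) false
      if (PySem.List.slice costs none (some m)).sum <= k then tt else ans) ans =
    l.foldl (fun ans i =>
      let t := PySem.Int.bor ans ((1 <<< i.toNat : Nat) : Int)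
      let costs := PySem.List.sorted (nums.map (fun x => pvCostB x t)) (fun c => c) false
      if (PySem.List.slice costs none (some m)).sum <= k then t else ans) ans := by
  intro l
  induction l with
  | nil => intro _ ans _ _; rfl
  | cons i rest ih =>
    intro hmem ans h0 h1
    simp only [List.foldl_cons]
    obtain ⟨hi0, hi30⟩ := hmem i (by simp)
    have htt : PySem.Int.bor ans ((1 <<< i.toNat : Nat) : Int) = ((ans.toNat ||| 2^i.toNat : Nat) : Int) := by
      have ha : ans = ((ans.toNat : Nat) : Int) := by omega
      conv_lhs => rw [ha]
      rw [PySem.Int.bor_natCast]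
      rw [Nat.one_shiftLeft]
    have httn0 : 0 ≤ PySem.Int.bor ans ((1 <<< i.toNat : Nat) : Int) := by rw [htt]; positivity
    have httlt : PySem.Int.bor ans ((1 <<< i.toNat : Nat) : Int) < 2147483648 := by
      rw [htt]
      have hor : ans.toNat ||| 2^i.toNat < 2^31 :=
        Nat.or_lt_two_pow (by omega) (by
          have h2 : (2:Nat)^i.toNat ≤ 2^30 := Nat.pow_le_pow_right (by norm_num) (by omega)
          omega)
      omega
    have hcosts : nums.foldl (fun cs x => cs ++ [pvCostA (PySem.Int.bor ans ((1 <<< i.toNat : Nat) : Int)) x]) []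
        = nums.map (fun x => pvCostB x (PySem.Int.bor ans ((1 <<< i.toNat : Nat) : Int))) := by
      rw [PySem.List.foldl_append_singleton_eq_map]
      rw [List.nil_append]
      apply List.map_congr_left
      intro x _
      exact pvCost_eq _ x httn0 httlt
    simp only [hcosts]
    by_cases hcond : (PySem.List.slice (PySem.List.sorted (nums.map (fun x => pvCostB x (PySem.Int.bor ans ((1 <<< i.toNat : Nat) : Int)))) (fun c => c) false) none (some m)).sum <= k
    · rw [if_pos hcond]
      exact ih (fun j hj => hmem j (by simp [hj])) _ httn0 httlt
    · rw [if_neg hcond]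
      exact ih (fun j hj => hmem j (by simp [hj])) _ h0 h1

lemma pvOuter (nums : List Int) (k m : Int) : maximumAND nums k m = maximumAND_alt nums k m := by
  unfold maximumAND maximumAND_alt
  exact pvOuterAux nums k m (PySem.List.pyRange 30 (-1) (-1)) (by decide) 0 (by norm_num) (by norm_num)

-- ===== VERDICT (by name: the statement is the Claim_ definition above) =====
theorem maximumAND_spec : Claim_equal_maximumAND := by
  intro nums k m _
  unfold Spec_maximumAND
  exact pvOuter nums k m
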